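-- pv_equiv track=rewrite | github.com/ThePicard/codechef | coins/coins4.py | maxbucks
-- ===== SOURCE A (Python) =====
-- cache = {}
--
-- def maxbucks(coin):
--     if coin in cache:
--         return cache[coin]
--     a = coin // 2
--     b = coin // 3
--     c = coin // 4
--     if a > 11:
--         a = maxbucks(a)
--         if b > 11:
--             b = maxbucks(b)
--             if c > 11:
--                 c = maxbucks(c)
--     abc = a + b + c
--     if abc < coin:
--         abc = coin
--     cache[coin] = abc
--     return abc
-- ===== SOURCE B (Python) =====
-- def _collect(n, need):
--     # gather every subproblem value (> 11) reachable from n via //2, //3, //4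
--     if n > 11 and n not in need:
--         need.add(n)
--         _collect(n // 2, need)
--         _collect(n // 3, need)
--         _collect(n // 4, need)
--
--
-- def maxbucks(coin):
--     need = set()
--     _collect(coin, need)
--     # bottom-up tabulation: fill the table in increasing order, smaller
--     # subproblems are already solved; values <= 11 are their own answer
--     table = {}
--     for n in sorted(need):
--         table[n] = max(n, table.get(n // 2, n // 2)
--                         + table.get(n // 3, n // 3)
--                         + table.get(n // 4, n // 4))
--     return table.get(coin, coin)
-- ===== Notes on version B (the rewrite author's own statement) =====
-- stated objective: alternative
-- what changed: Replaces A's top-down memoized recursion with a two-phase bottom-up dynamic program: first an explicit pass collects the set of reachable subproblems, then an iterative loop tabulates them in increasing order (no recursion computes any value).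
import Mathlib
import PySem

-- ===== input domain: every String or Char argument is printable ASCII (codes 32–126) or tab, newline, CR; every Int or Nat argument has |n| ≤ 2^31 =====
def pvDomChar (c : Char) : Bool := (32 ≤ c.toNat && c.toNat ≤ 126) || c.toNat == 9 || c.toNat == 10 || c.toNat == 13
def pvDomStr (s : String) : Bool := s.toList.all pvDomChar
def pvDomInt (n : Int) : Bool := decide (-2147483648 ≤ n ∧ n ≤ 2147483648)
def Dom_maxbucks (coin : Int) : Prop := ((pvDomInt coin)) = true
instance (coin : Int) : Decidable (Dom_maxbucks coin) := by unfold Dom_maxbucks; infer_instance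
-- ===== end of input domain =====

-- B replaces A's top-down memoized recursion with a two-phase bottom-up dynamic program:
-- a collection pass gathers the set of reachable subproblems (> 11), then an iterative
-- loop tabulates them in increasing order. Return values agree; A additionally mutates a
-- module-level cache dict across calls (B keeps no cross-call state) — the equivalence
-- proved here is about the return value, with A's cache threaded explicitly from empty
-- (the cache only ever stores values A's own recursion computes, so persistence across
-- calls never changes a return value).

-- floor division by a positive literal is Lean's Int '/', cited from PySem
theorem pvFd2 (a : Int) : PySem.Int.floordiv a 2 = a / 2 := PySem.Int.floordiv_eq_ediv_of_pos (by norm_num)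
theorem pvFd3 (a : Int) : PySem.Int.floordiv a 3 = a / 3 := PySem.Int.floordiv_eq_ediv_of_pos (by norm_num)
theorem pvFd4 (a : Int) : PySem.Int.floordiv a 4 = a / 4 := PySem.Int.floordiv_eq_ediv_of_pos (by norm_num)

-- ===== PORT A =====
-- A's body with the module-level 'cache' as threaded state
def maxbucksGoA (coin : Int) (cache : PySem.Dict Int Int) : Int × PySem.Dict Int Int :=
  match cache.get? coin with
  | some v => (v, cache)
  | none =>
    let a0 := PySem.Int.floordiv coin 2
    let b0 := PySem.Int.floordiv coin 3
    let c0 := PySem.Int.floordiv coin 4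
    let st :=
      if ha : a0 > 11 then
        let sa := maxbucksGoA a0 cache
        if hb : b0 > 11 then
          let sb := maxbucksGoA b0 sa.2
          if hc : c0 > 11 then
            let sc := maxbucksGoA c0 sb.2
            (sa.1 + sb.1 + sc.1, sc.2)
          else (sa.1 + sb.1 + c0, sb.2)
        else (sa.1 + b0 + c0, sa.2)
      else (a0 + b0 + c0, cache)
    let abc := if st.1 < coin then coin else st.1
    (abc, st.2.insert coin abc)
termination_by coin.toNat
decreasing_by
  · simp only [a0, pvFd2] at ha; rw [pvFd2]; omega
  · simp only [b0, pvFd3] at hb; rw [pvFd3]; omega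
  · simp only [c0, pvFd4] at hc; rw [pvFd4]; omega

def maxbucks (coin : Int) : Int := (maxbucksGoA coin PySem.Dict.empty).1

-- ===== PORT B =====
-- phase 1: collect every subproblem value (> 11) reachable via //2, //3, //4
def mbCollect (n : Int) (need : PySem.Set Int) : PySem.Set Int :=
  if h : 11 < n ∧ n ∉ need then
    let s1 := PySem.Set.add need n
    let s2 := mbCollect (PySem.Int.floordiv n 2) s1
    let s3 := mbCollect (PySem.Int.floordiv n 3) s2
    mbCollect (PySem.Int.floordiv n 4) s3
  else need
termination_by n.toNat
decreasing_by
  · rw [pvFd2]; omega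
  · rw [pvFd3]; omega
  · rw [pvFd4]; omega

-- phase 2: bottom-up tabulation in increasing order, then one lookup
def maxbucks_alt (coin : Int) : Int :=
  let need := mbCollect coin PySem.Set.empty
  let table :=
    (PySem.List.sorted need (fun x => x) false).foldl
      (fun d n =>
        d.insert n (max n (d.getD (PySem.Int.floordiv n 2) (PySem.Int.floordiv n 2)
          + d.getD (PySem.Int.floordiv n 3) (PySem.Int.floordiv n 3)
          + d.getD (PySem.Int.floordiv n 4) (PySem.Int.floordiv n 4))))
      PySem.Dict.empty
  table.getD coin coin

-- ===== PRECONDITION & SPEC =====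
def Spec_maxbucks (coin : Int) (out : Int) : Prop := out = maxbucks_alt coin
instance (coin : Int) (out : Int) : Decidable (Spec_maxbucks coin out) := by unfold Spec_maxbucks; infer_instance

-- ===== CLAIM (what is proved, stated in full; the proofs are below) =====
def Claim_equal_maxbucks : Prop := ∀ (coin : Int), Dom_maxbucks coin → Spec_maxbucks coin (maxbucks coin)

-- ===== LEMMAS AND PROOFS =====

-- pure (cache-free) value of the recurrence, the proofs' reference point
def mbPure (coin : Int) : Int :=
  if h : coin ≤ 11 then coin
  else max coin (mbPure (coin / 2) + mbPure (coin / 3) + mbPure (coin / 4))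
termination_by coin.toNat
decreasing_by all_goals omega

theorem mbPure_of_le (coin : Int) (h : coin ≤ 11) : mbPure coin = coin := by
  rw [mbPure]; simp [h]

theorem mbPure_of_gt (coin : Int) (h : ¬ coin ≤ 11) :
    mbPure coin = max coin (mbPure (coin / 2) + mbPure (coin / 3) + mbPure (coin / 4)) := by
  rw [mbPure]; simp [h]

-- A-side: cache invariant — every stored value is the pure value of its key
def GoodCache (d : PySem.Dict Int Int) : Prop :=
  ∀ k v, d.get? k = some v → v = mbPure k

theorem goodCache_empty : GoodCache PySem.Dict.empty := by
  intro k v h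
  simp [PySem.Dict.empty, PySem.Dict.get?] at h

theorem goodCache_insert (d : PySem.Dict Int Int) (k : Int) (hd : GoodCache d) :
    GoodCache (d.insert k (mbPure k)) := by
  intro k' v h
  rw [PySem.Dict.get?_insert] at h
  split at h
  · next heq => cases h; rw [heq]
  · exact hd k' v h

theorem maxbucksGoA_correct (n : Nat) :
    ∀ coin : Int, ∀ cache : PySem.Dict Int Int, coin.toNat ≤ n → GoodCache cache →
      (maxbucksGoA coin cache).1 = mbPure coin ∧ GoodCache (maxbucksGoA coin cache).2 := by
  induction n with
  | zero =>
    intro coin cache hn hg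
    rw [maxbucksGoA]
    cases h : cache.get? coin with
    | some v => exact ⟨hg coin v h, hg⟩
    | none =>
      simp only [pvFd2, pvFd3, pvFd4]
      rw [dif_neg (by omega : ¬ (coin / 2 > 11))]
      have hval : (if coin / 2 + coin / 3 + coin / 4 < coin then coin
          else coin / 2 + coin / 3 + coin / 4) = mbPure coin := by
        rw [mbPure_of_le coin (by omega)]; split <;> omega
      rw [hval]
      exact ⟨rfl, goodCache_insert cache coin hg⟩
  | succ n ih =>
    intro coin cache hn hg
    rw [maxbucksGoA]
    cases h : cache.get? coin with
    | some v => exact ⟨hg coin v h, hg⟩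
    | none =>
      simp only [pvFd2, pvFd3, pvFd4]
      by_cases ha : coin / 2 > 11
      · rw [dif_pos ha]
        obtain ⟨h2v, h2g⟩ := ih (coin / 2) cache (by omega) hg
        have hgt : ¬ coin ≤ 11 := by omega
        by_cases hb : coin / 3 > 11
        · rw [dif_pos hb]
          obtain ⟨h3v, h3g⟩ := ih (coin / 3) _ (by omega) h2g
          by_cases hc4 : coin / 4 > 11
          · rw [dif_pos hc4]
            obtain ⟨h4v, h4g⟩ := ih (coin / 4) _ (by omega) h3g
            have hval : (if (maxbucksGoA (coin / 2) cache).1 +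
                (maxbucksGoA (coin / 3) (maxbucksGoA (coin / 2) cache).2).1 +
                (maxbucksGoA (coin / 4) (maxbucksGoA (coin / 3) (maxbucksGoA (coin / 2) cache).2).2).1 < coin
                then coin else (maxbucksGoA (coin / 2) cache).1 +
                (maxbucksGoA (coin / 3) (maxbucksGoA (coin / 2) cache).2).1 +
                (maxbucksGoA (coin / 4) (maxbucksGoA (coin / 3) (maxbucksGoA (coin / 2) cache).2).2).1) = mbPure coin := by
              rw [h2v, h3v, h4v, mbPure_of_gt coin hgt]
              rcases max_cases coin (mbPure (coin/2) + mbPure (coin/3) + mbPure (coin/4)) with ⟨e, le⟩ | ⟨e, lt⟩ <;>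
                rw [e] <;> split <;> omega
            rw [hval]
            exact ⟨rfl, goodCache_insert _ coin h4g⟩
          · rw [dif_neg hc4]
            have h4 : mbPure (coin / 4) = coin / 4 := mbPure_of_le _ (by omega)
            have hval : (if (maxbucksGoA (coin / 2) cache).1 +
                (maxbucksGoA (coin / 3) (maxbucksGoA (coin / 2) cache).2).1 + coin / 4 < coin
                then coin else (maxbucksGoA (coin / 2) cache).1 +
                (maxbucksGoA (coin / 3) (maxbucksGoA (coin / 2) cache).2).1 + coin / 4) = mbPure coin := by
              rw [h2v, h3v, mbPure_of_gt coin hgt, h4]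
              rcases max_cases coin (mbPure (coin/2) + mbPure (coin/3) + coin / 4) with ⟨e, le⟩ | ⟨e, lt⟩ <;>
                rw [e] <;> split <;> omega
            rw [hval]
            exact ⟨rfl, goodCache_insert _ coin h3g⟩
        · rw [dif_neg hb]
          have h3 : mbPure (coin / 3) = coin / 3 := mbPure_of_le _ (by omega)
          have h4 : mbPure (coin / 4) = coin / 4 := mbPure_of_le _ (by omega)
          have hval : (if (maxbucksGoA (coin / 2) cache).1 + coin / 3 + coin / 4 < coin
              then coin else (maxbucksGoA (coin / 2) cache).1 + coin / 3 + coin / 4) = mbPure coin := by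
            rw [h2v, mbPure_of_gt coin hgt, h3, h4]
            rcases max_cases coin (mbPure (coin/2) + coin / 3 + coin / 4) with ⟨e, le⟩ | ⟨e, lt⟩ <;>
              rw [e] <;> split <;> omega
          rw [hval]
          exact ⟨rfl, goodCache_insert _ coin h2g⟩
      · rw [dif_neg ha]
        have hval : (if coin / 2 + coin / 3 + coin / 4 < coin then coin
            else coin / 2 + coin / 3 + coin / 4) = mbPure coin := by
          by_cases hc : coin ≤ 11
          · rw [mbPure_of_le coin hc]; split <;> omega
          · rw [mbPure_of_gt coin hc, mbPure_of_le (coin / 2) (by omega),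
              mbPure_of_le (coin / 3) (by omega), mbPure_of_le (coin / 4) (by omega)]
            rcases max_cases coin (coin / 2 + coin / 3 + coin / 4) with ⟨e, le⟩ | ⟨e, lt⟩ <;>
              rw [e] <;> split <;> omega
        rw [hval]
        exact ⟨rfl, goodCache_insert cache coin hg⟩

-- B-side, phase 1: what the collected set satisfies
theorem mbCollect_spec (N : Nat) :
    ∀ n : Int, ∀ need : PySem.Set Int, n.toNat ≤ N → (∀ m ∈ need, (11:Int) < m) → need.Nodup →
      (∀ m ∈ need, m ∈ mbCollect n need) ∧
      (∀ m ∈ mbCollect n need, (11:Int) < m) ∧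
      (11 < n → n ∈ mbCollect n need) ∧
      (mbCollect n need).Nodup ∧
      (∀ m ∈ mbCollect n need, m ∉ need →
        (11 < m / 2 → m / 2 ∈ mbCollect n need) ∧
        (11 < m / 3 → m / 3 ∈ mbCollect n need) ∧
        (11 < m / 4 → m / 4 ∈ mbCollect n need)) := by
  induction N with
  | zero =>
    intro n need hN hgt hnd
    rw [mbCollect, dif_neg (by omega : ¬ (11 < n ∧ n ∉ need))]
    exact ⟨fun m hm => hm, hgt, fun h => by omega, hnd, fun m hm hnot => absurd hm hnot⟩
  | succ N ih =>
    intro n need hN hgt hnd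
    rw [mbCollect]
    by_cases h : 11 < n ∧ n ∉ need
    · rw [dif_pos h]
      simp only [pvFd2, pvFd3, pvFd4]
      have hmem1 : ∀ m, m ∈ PySem.Set.add need n ↔ m ∈ need ∨ m = n := by
        intro m; exact PySem.Set.mem_add need n m
      have hgt1 : ∀ m ∈ PySem.Set.add need n, (11:Int) < m := by
        intro m hm; rcases (hmem1 m).1 hm with hm' | rfl
        · exact hgt m hm'
        · exact h.1
      have hnd1 : (PySem.Set.add need n).Nodup := PySem.Set.nodup_add need n hnd
      obtain ⟨mo2, gt2, self2, nd2, cl2⟩ := ih (n / 2) (PySem.Set.add need n) (by omega) hgt1 hnd1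
      obtain ⟨mo3, gt3, self3, nd3, cl3⟩ := ih (n / 3) _ (by omega) gt2 nd2
      obtain ⟨mo4, gt4, self4, nd4, cl4⟩ := ih (n / 4) _ (by omega) gt3 nd3
      have sub2 : ∀ m, m ∈ mbCollect (n / 2) (PySem.Set.add need n) →
          m ∈ mbCollect (n / 4) (mbCollect (n / 3) (mbCollect (n / 2) (PySem.Set.add need n))) :=
        fun m hm => mo4 m (mo3 m hm)
      have sub3 : ∀ m, m ∈ mbCollect (n / 3) (mbCollect (n / 2) (PySem.Set.add need n)) →
          m ∈ mbCollect (n / 4) (mbCollect (n / 3) (mbCollect (n / 2) (PySem.Set.add need n))) :=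
        fun m hm => mo4 m hm
      have hnfin : n ∈ mbCollect (n / 4) (mbCollect (n / 3) (mbCollect (n / 2) (PySem.Set.add need n))) :=
        sub2 n (mo2 n ((hmem1 n).2 (Or.inr rfl)))
      refine ⟨fun m hm => sub2 m (mo2 m ((hmem1 m).2 (Or.inl hm))), gt4, fun _ => hnfin, nd4, ?_⟩
      intro m hm hmneed
      by_cases hm3 : m ∈ mbCollect (n / 3) (mbCollect (n / 2) (PySem.Set.add need n))
      · by_cases hm2 : m ∈ mbCollect (n / 2) (PySem.Set.add need n)
        · by_cases hm1 : m ∈ PySem.Set.add need n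
          · -- m ∈ need ∪ {n}, m ∉ need, so m = n
            rcases (hmem1 m).1 hm1 with hmn | rfl
            · exact absurd hmn hmneed
            · exact ⟨fun hg => sub2 _ (self2 hg), fun hg => sub3 _ (self3 hg), fun hg => self4 hg⟩
          · obtain ⟨c2, c3, c4⟩ := cl2 m hm2 hm1
            exact ⟨fun hg => sub2 _ (c2 hg), fun hg => sub2 _ (c3 hg), fun hg => sub2 _ (c4 hg)⟩
        · obtain ⟨c2, c3, c4⟩ := cl3 m hm3 hm2
          exact ⟨fun hg => sub3 _ (c2 hg), fun hg => sub3 _ (c3 hg), fun hg => sub3 _ (c4 hg)⟩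
      · obtain ⟨c2, c3, c4⟩ := cl4 m hm hm3
        exact ⟨c2, c3, c4⟩
    · rw [dif_neg h]
      refine ⟨fun m hm => hm, hgt, fun hg => ?_, hnd, fun m hm hnot => absurd hm hnot⟩
      by_cases hn : n ∈ need
      · exact hn
      · exact absurd ⟨hg, hn⟩ h

-- B-side, phase 2: the tabulation fold fills the table with the pure values
theorem mbFill_spec (S : List Int)
    (hgt : ∀ m ∈ S, (11:Int) < m)
    (hcl : ∀ m ∈ S, (11 < m / 2 → m / 2 ∈ S) ∧ (11 < m / 3 → m / 3 ∈ S) ∧ (11 < m / 4 → m / 4 ∈ S)) :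
    ∀ l : List Int, ∀ d : PySem.Dict Int Int,
      l.Pairwise (· < ·) → (∀ x ∈ l, x ∈ S) →
      (∀ k v, d.get? k = some v → v = mbPure k ∧ k ∈ S) →
      (∀ m ∈ S, m ∉ l → (d.get? m).isSome) →
      (∀ k v, (l.foldl (fun d n =>
          d.insert n (max n (d.getD (n / 2) (n / 2) + d.getD (n / 3) (n / 3) + d.getD (n / 4) (n / 4))))
          d).get? k = some v → v = mbPure k ∧ k ∈ S) ∧
      (∀ m ∈ S, ((l.foldl (fun d n =>
          d.insert n (max n (d.getD (n / 2) (n / 2) + d.getD (n / 3) (n / 3) + d.getD (n / 4) (n / 4))))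
          d).get? m).isSome) := by
  intro l
  induction l with
  | nil =>
    intro d _ _ hsound hcomp
    exact ⟨hsound, fun m hm => hcomp m hm (List.not_mem_nil)⟩
  | cons n t ih =>
    intro d hpw hmem hsound hcomp
    have hnS : n ∈ S := hmem n List.mem_cons_self
    have hn11 : (11:Int) < n := hgt n hnS
    have hchild : ∀ m : Int, m < n → (11 < m → m ∈ S) → d.getD m m = mbPure m := by
      intro m hlt hmS
      by_cases h11 : (11:Int) < m
      · have hmem' : m ∈ S := hmS h11
        have hnot : m ∉ n :: t := by
          intro hc
          rcases List.mem_cons.mp hc with rfl | hc'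
          · omega
          · have := (List.pairwise_cons.mp hpw).1 m hc'; omega
        have := hcomp m hmem' hnot
        obtain ⟨v, hv⟩ := Option.isSome_iff_exists.mp this
        rw [PySem.Dict.getD_of_get?_eq_some d m hv, (hsound m v hv).1]
      · have hnone : d.get? m = none := by
          cases hg : d.get? m with
          | none => rfl
          | some v => have := (hsound m v hg).2; have := hgt m this; omega
        rw [PySem.Dict.getD_of_get?_eq_none d m hnone, mbPure_of_le m (by omega)]
    obtain ⟨c2, c3, c4⟩ := hcl n hnS
    have hv2 : d.getD (n / 2) (n / 2) = mbPure (n / 2) := hchild _ (by omega) c2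
    have hv3 : d.getD (n / 3) (n / 3) = mbPure (n / 3) := hchild _ (by omega) c3
    have hv4 : d.getD (n / 4) (n / 4) = mbPure (n / 4) := hchild _ (by omega) c4
    have hval : max n (d.getD (n / 2) (n / 2) + d.getD (n / 3) (n / 3) + d.getD (n / 4) (n / 4))
        = mbPure n := by
      rw [hv2, hv3, hv4, mbPure_of_gt n (by omega)]
    simp only [List.foldl_cons, hval]
    apply ih (d.insert n (mbPure n)) (List.pairwise_cons.mp hpw).2
      (fun x hx => hmem x (List.mem_cons_of_mem n hx))
    · intro k v hk
      rw [PySem.Dict.get?_insert] at hk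
      split at hk
      · next heq => cases hk; exact ⟨by rw [heq], heq ▸ hnS⟩
      · exact hsound k v hk
    · intro m hm hmt
      by_cases hmn : m = n
      · subst hmn; rw [PySem.Dict.get?_insert_self]; rfl
      · rw [PySem.Dict.get?_insert_of_ne d (mbPure n) hmn]
        exact hcomp m hm (by simp [hmt, hmn])

-- B computes the pure value
theorem maxbucks_alt_eq_mbPure (coin : Int) : maxbucks_alt coin = mbPure coin := by
  unfold maxbucks_alt
  simp only [pvFd2, pvFd3, pvFd4]
  obtain ⟨mo, hgt, hself, hnd, hcl⟩ :=
    mbCollect_spec coin.toNat coin PySem.Set.empty le_rfl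
      (by intro m hm; simp [PySem.Set.empty] at hm)
      (by simp [PySem.Set.empty])
  have hcl' : ∀ m ∈ mbCollect coin PySem.Set.empty,
      (11 < m / 2 → m / 2 ∈ mbCollect coin PySem.Set.empty) ∧
      (11 < m / 3 → m / 3 ∈ mbCollect coin PySem.Set.empty) ∧
      (11 < m / 4 → m / 4 ∈ mbCollect coin PySem.Set.empty) := by
    intro m hm
    exact hcl m hm (by simp [PySem.Set.empty])
  set S := mbCollect coin PySem.Set.empty with hS
  set l := PySem.List.sorted S (fun x => x) false with hl
  have hperm : l.Perm S := PySem.List.sorted_perm S (fun x => x) false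
  have hpw : l.Pairwise (· < ·) := by
    have hle : l.Pairwise (· ≤ ·) := PySem.List.sorted_pairwise S (fun x => x)
    have hndl : l.Nodup := hperm.nodup_iff.mpr hnd
    exact (hle.and hndl).imp (fun h => lt_of_le_of_ne h.1 h.2)
  have hmeml : ∀ x, x ∈ l ↔ x ∈ S := fun x => hperm.mem_iff
  obtain ⟨hsound, hcomp⟩ := mbFill_spec S hgt hcl' l PySem.Dict.empty hpw
    (fun x hx => (hmeml x).1 hx)
    (by intro k v hk; simp [PySem.Dict.empty, PySem.Dict.get?] at hk)
    (fun m hm hnl => absurd ((hmeml m).2 hm) hnl)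
  set table := l.foldl (fun d n =>
      d.insert n (max n (d.getD (n / 2) (n / 2) + d.getD (n / 3) (n / 3) + d.getD (n / 4) (n / 4))))
      PySem.Dict.empty with ht
  by_cases h11 : (11:Int) < coin
  · have hin : coin ∈ S := hself h11
    obtain ⟨v, hv⟩ := Option.isSome_iff_exists.mp (hcomp coin hin)
    rw [PySem.Dict.getD_of_get?_eq_some table coin hv, (hsound coin v hv).1]
  · have hnone : table.get? coin = none := by
      cases hg : table.get? coin with
      | none => rfl
      | some v => have := (hsound coin v hg).2; have := hgt coin this; omega
    rw [PySem.Dict.getD_of_get?_eq_none table coin hnone, mbPure_of_le coin (by omega)]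

-- ===== VERDICT (by name: the statement is the Claim_ definition above) =====
theorem maxbucks_spec : Claim_equal_maxbucks := by
  intro coin _
  unfold Spec_maxbucks maxbucks
  rw [(maxbucksGoA_correct coin.toNat coin PySem.Dict.empty le_rfl goodCache_empty).1,
    maxbucks_alt_eq_mbPure]
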